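-- pv_equiv track=rewrite | github.com/meetrk/GEO-research | GEO_new_methods/src/chooser.py | choose_document
-- ===== SOURCE A (Python) =====
-- from typing import List
--
-- def choose_document(sources: List[str], scores: List[int]) -> int:
--     """
--     Chooses the index of one document from the sources based on the lowest non-zero score.
--     If multiple documents have the same lowest non-zero score, chooses the one with the highest index.
--
--     Args:
--         sources (List[str]): List of document strings.
--         scores (List[int]): List of corresponding scores for each document.
--
--     Returns:
--         int: The index of the chosen document with the lowest non-zero score. If multiple documents
--              have the same lowest non-zero score, returns the one with the highest index.
--              Returns -1 if no valid document is found.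
--     """
--
--     if not sources or not scores or len(sources) != len(scores):
--         return -1
--
--     non_zero_indices = [i for i, score in enumerate(scores) if score != 0]
--     if not non_zero_indices:
--         return -1
--
--     min_non_zero_score = min(scores[i] for i in non_zero_indices)
--     min_score_indices = [i for i in non_zero_indices if scores[i] == min_non_zero_score]
--     chosen_index = max(min_score_indices)
--
--     return chosen_index
-- ===== SOURCE B (Python) =====
-- from typing import List
--
-- def choose_document(sources: List[str], scores: List[int]) -> int:
--     if not sources or not scores or len(sources) != len(scores):
--         return -1
--     best_index = -1
--     best_score = None
--     for i, score in enumerate(scores):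
--         if score != 0 and (best_score is None or score <= best_score):
--             best_score = score
--             best_index = i
--     return best_index
-- ===== Notes on version B (the rewrite author's own statement) =====
-- stated objective: simpler
-- what changed: Replaces A's four passes (collect non-zero indices, min over them, collect tie indices, max) by one single scan keeping a running best score/index, where updating on equality yields the highest-index tie-break.
import Mathlib
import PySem

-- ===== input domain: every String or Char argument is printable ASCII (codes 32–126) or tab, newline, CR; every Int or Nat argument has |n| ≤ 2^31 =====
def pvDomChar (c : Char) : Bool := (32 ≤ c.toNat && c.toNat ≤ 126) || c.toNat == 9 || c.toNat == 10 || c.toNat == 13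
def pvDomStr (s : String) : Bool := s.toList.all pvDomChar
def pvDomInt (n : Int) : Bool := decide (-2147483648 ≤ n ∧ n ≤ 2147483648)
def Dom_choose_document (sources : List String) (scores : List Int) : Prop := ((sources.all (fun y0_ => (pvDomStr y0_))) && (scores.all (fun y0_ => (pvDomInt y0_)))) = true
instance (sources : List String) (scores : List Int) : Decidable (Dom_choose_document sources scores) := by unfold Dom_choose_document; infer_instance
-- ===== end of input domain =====

-- B replaces A's four passes (non-zero indices, min, tie indices, max) by one scan with
-- a running best score/index that also updates on equal score (objective: simpler).

-- ===== PORT A =====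
def choose_document (sources : List String) (scores : List Int) : Int :=
  if sources = [] ∨ scores = [] ∨ sources.length ≠ scores.length then -1
  else
    let non_zero_indices :=
      ((PySem.List.enumerate scores).filter (fun p => decide (p.2 ≠ 0))).map (·.1)
    if non_zero_indices = [] then -1
    else
      let min_non_zero_score :=
        (PySem.List.min? (non_zero_indices.map (fun i => PySem.List.pyGetD scores i 0))
          (fun x => x)).getD 0
      let min_score_indices :=
        non_zero_indices.filter
          (fun i => decide (PySem.List.pyGetD scores i 0 = min_non_zero_score))
      (PySem.List.max? min_score_indices (fun x => x)).getD (-1)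

-- ===== PORT B =====
def choose_document_alt (sources : List String) (scores : List Int) : Int :=
  if sources = [] ∨ scores = [] ∨ sources.length ≠ scores.length then -1
  else
    let st := (PySem.List.enumerate scores).foldl
      (fun (st : Int × Option Int) p =>
        if p.2 ≠ 0 ∧ (st.2 = none ∨ p.2 ≤ st.2.getD 0) then (p.1, some p.2) else st)
      (-1, none)
    st.1

-- ===== PRECONDITION & SPEC =====
def Spec_choose_document (sources : List String) (scores : List Int) (out : Int) : Prop := out = choose_document_alt sources scores
instance (sources : List String) (scores : List Int) (out : Int) : Decidable (Spec_choose_document sources scores out) := by unfold Spec_choose_document; infer_instance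

-- ===== CLAIM (what is proved, stated in full; the proofs are below) =====
def Claim_equal_choose_document : Prop := ∀ (sources : List String) (scores : List Int), Dom_choose_document sources scores → Spec_choose_document sources scores (choose_document sources scores)

-- ===== LEMMAS AND PROOFS =====

/-- B's fold step. -/
def pvStep (st : Int × Option Int) (p : Int × Int) : Int × Option Int :=
  if p.2 ≠ 0 ∧ (st.2 = none ∨ p.2 ≤ st.2.getD 0) then (p.1, some p.2) else st


def pvBest : List (Int × Int) → Int × Option Int
  | [] => (-1, none)
  | p :: t =>
    let r := pvBest t
    if p.2 ≠ 0 ∧ (r.2 = none ∨ p.2 < r.2.getD 0) then (p.1, some p.2) else r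

theorem pvBest_none (ps : List (Int × Int)) :
    (pvBest ps).2 = none ↔ ps.filter (fun p => decide (p.2 ≠ 0)) = [] := by
  induction ps with
  | nil => simp [pvBest]
  | cons p t ih =>
    rcases hgt : pvBest t with ⟨ri, rs⟩
    simp only [pvBest, hgt, List.filter_cons]
    rcases rs with _ | m <;> split_ifs <;> simp_all
    assumption

theorem pvBest_spec (ps : List (Int × Int))
    (hinc : ps.Pairwise (fun a b => a.1 < b.1)) :
    ∀ m i, pvBest ps = (i, some m) →
      PySem.List.min? ((ps.filter (fun p => decide (p.2 ≠ 0))).map (·.2)) (fun x => x) = some m ∧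
      PySem.List.max? (((ps.filter (fun p => decide (p.2 ≠ 0))).filter
          (fun p => decide (p.2 = m))).map (·.1)) (fun x => x) = some i := by
  induction ps with
  | nil => intro m i h; simp [pvBest] at h
  | cons p t ih =>
    have hp : ∀ q ∈ t, p.1 < q.1 := fun q hq => (List.pairwise_cons.mp hinc).1 q hq
    have ihp := ih (List.pairwise_cons.mp hinc).2
    intro m i h
    rcases hgt : pvBest t with ⟨ri, rs⟩
    by_cases hs : p.2 = 0
    · -- p skipped on both sides
      rw [List.filter_cons_of_neg (by simp [hs])]
      apply ihp
      rw [← h]; simp [pvBest, hgt, hs]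
    · rw [List.filter_cons_of_pos (by simp [hs])]
      rcases rs with _ | mt
      · -- tail all zero
        have hnzt : t.filter (fun p => decide (p.2 ≠ 0)) = [] := by
          rw [← pvBest_none t, hgt]
        have h' : p.1 = i ∧ p.2 = m := by
          simp [pvBest, hgt, hs] at h; exact ⟨h.1, h.2⟩
        rcases h' with ⟨hi, hm⟩
        subst hi; subst hm
        rw [hnzt]
        constructor
        · rw [List.map_cons, List.map_nil, PySem.List.min?_id_cons]
          simp
        · rw [List.filter_cons_of_pos (by simp), List.filter_nil, List.map_cons, List.map_nil,
            PySem.List.max?_id_cons]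
          simp
      · -- tail best = (ri, some mt)
        have ⟨hmin, hmax⟩ := ihp mt ri hgt
        have hmt_mem : mt ∈ (t.filter (fun p => decide (p.2 ≠ 0))).map (·.2) :=
          PySem.List.min?_mem hmin
        have hmt_min : ∀ y ∈ (t.filter (fun p => decide (p.2 ≠ 0))).map (·.2), mt ≤ y :=
          fun y hy => PySem.List.min?_isMin hmin y hy
        by_cases hlt : p.2 < mt
        · -- p strictly better: pvBest (p::t) = (p.1, some p.2)
          have h' : p.1 = i ∧ p.2 = m := by
            simp [pvBest, hgt, hs, hlt] at h; exact ⟨h.1, h.2⟩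
          rcases h' with ⟨hi, hm⟩; subst hi; subst hm
          constructor
          · rw [List.map_cons, PySem.List.min?_id_cons]
            congr 1
            have h1 := (PySem.List.foldl_min_le ((t.filter (fun p => decide (p.2 ≠ 0))).map (·.2)) p.2).1
            have hmm := PySem.List.foldl_min_mem ((t.filter (fun p => decide (p.2 ≠ 0))).map (fun x => x.2)) p.2
            rcases hmm with he | he
            · exact he
            · have := hmt_min _ he; omega
          · have hties : (t.filter (fun p => decide (p.2 ≠ 0))).filter (fun q => decide (q.2 = p.2)) = [] := by
              rw [List.filter_eq_nil_iff]
              intro q hq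
              have := hmt_min q.2 (List.mem_map_of_mem hq)
              simp; omega
            rw [List.filter_cons_of_pos (by simp), hties, List.map_cons, List.map_nil,
              PySem.List.max?_id_cons]
            simp
        · -- mt ≤ p.2 : pvBest (p::t) = (ri, some mt)
          have h' : ri = i ∧ mt = m := by
            simp [pvBest, hgt, hs, hlt] at h
            exact ⟨h.1, h.2⟩
          rcases h' with ⟨hi, hm⟩; subst hi; subst hm
          constructor
          · rw [List.map_cons, PySem.List.min?_id_cons]
            congr 1
            have h1 := PySem.List.foldl_min_le ((t.filter (fun p => decide (p.2 ≠ 0))).map (·.2)) p.2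
            have hub : (((t.filter (fun p => decide (p.2 ≠ 0))).map (·.2)).foldl min p.2) ≤ mt :=
              h1.2 mt hmt_mem
            have hlb : mt ≤ (((t.filter (fun p => decide (p.2 ≠ 0))).map (fun x => x.2)).foldl min p.2) := by
              have hmm := PySem.List.foldl_min_mem ((t.filter (fun p => decide (p.2 ≠ 0))).map (fun x => x.2)) p.2
              rcases hmm with he | he
              · omega
              · exact hmt_min _ he
            omega
          · by_cases hpm : p.2 = mt
            · rw [List.filter_cons_of_pos (by simp [hpm]), List.map_cons,
                PySem.List.max?_id_cons]
              congr 1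
              have hri_mem : ri ∈ ((t.filter (fun p => decide (p.2 ≠ 0))).filter (fun q => decide (q.2 = mt))).map (·.1) :=
                PySem.List.max?_mem hmax
              have hri_max : ∀ y ∈ ((t.filter (fun p => decide (p.2 ≠ 0))).filter (fun q => decide (q.2 = mt))).map (·.1), y ≤ ri :=
                fun y hy => PySem.List.max?_isMax hmax y hy
              have hpi : p.1 < ri := by
                rcases List.mem_map.mp hri_mem with ⟨q, hq, hq1⟩
                have : q ∈ t := List.mem_of_mem_filter (List.mem_of_mem_filter hq)
                have := hp q this; omega
              have h2 := PySem.List.le_foldl_max (((t.filter (fun p => decide (p.2 ≠ 0))).filter (fun q => decide (q.2 = mt))).map (·.1)) p.1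
              have hub : ri ≤ _ := h2.2 ri hri_mem
              have hmm := PySem.List.foldl_max_mem (((t.filter (fun p => decide (p.2 ≠ 0))).filter (fun q => decide (q.2 = mt))).map (fun x => x.1)) p.1
              rcases hmm with he | he
              · omega
              · have := hri_max _ he; omega
            · rw [List.filter_cons_of_neg (by simp [hpm])]
              exact hmax

theorem pv_enum_le (xs : List Int) (s : Int) : ∀ q ∈ PySem.List.enumerate xs s, s ≤ q.1 := by
  induction xs generalizing s with
  | nil => simp [PySem.List.enumerate_nil]
  | cons x t ih =>
    intro q hq
    rw [PySem.List.enumerate_cons] at hq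
    rcases List.mem_cons.mp hq with hq | hq
    · simp [hq]
    · have := ih (s+1) q hq; omega

theorem pv_enum_pairwise (xs : List Int) (s : Int) :
    List.Pairwise (fun a b : Int × Int => a.1 < b.1) (PySem.List.enumerate xs s) := by
  induction xs generalizing s with
  | nil => simp [PySem.List.enumerate_nil]
  | cons x t ih =>
    rw [PySem.List.enumerate_cons]
    exact List.Pairwise.cons (fun q hq => by have := pv_enum_le t (s+1) q hq; simp; omega) (ih (s+1))

theorem pv_enum_get (xs : List Int) : ∀ q ∈ PySem.List.enumerate xs 0,
    PySem.List.pyGetD xs q.1 0 = q.2 := by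
  intro q hq
  rw [List.mem_iff_getElem] at hq
  rcases hq with ⟨k, hk, hq⟩
  rw [PySem.List.getElem_enumerate] at hq
  have hk' : k < xs.length := by
    have := hk; rwa [PySem.List.length_enumerate] at this
  subst hq
  simp [PySem.List.pyGetD_natCast, List.getD_eq_getElem?_getD, List.getElem?_eq_getElem hk']

theorem pvFoldl_step (ps : List (Int × Int)) : ∀ st : Int × Option Int,
    ps.foldl pvStep st =
      match (pvBest ps).2 with
      | none => st
      | some m =>
        if st.2 = none ∨ m ≤ st.2.getD 0 then pvBest ps else st := by
  induction ps with
  | nil => intro st; simp [pvBest]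
  | cons p t ih =>
    intro st
    rcases p with ⟨i, s⟩
    simp only [List.foldl_cons]
    rw [ih]
    simp only [pvBest, pvStep]
    rcases hgt : pvBest t with ⟨ri, rs⟩
    rcases rs with _ | m <;> rcases hst : st.2 with _ | b <;>
      simp_all <;> split_ifs <;> simp_all <;> omega

-- ===== VERDICT (by name: the statement is the Claim_ definition above) =====
theorem choose_document_spec : Claim_equal_choose_document := by
  intro sources scores _
  unfold Spec_choose_document choose_document choose_document_alt
  by_cases hg : sources = [] ∨ scores = [] ∨ sources.length ≠ scores.length
  · simp [hg]
  · simp only [if_neg hg]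
    have hstep : (fun (st : Int × Option Int) p =>
        if p.2 ≠ 0 ∧ (st.2 = none ∨ p.2 ≤ st.2.getD 0) then (p.1, some p.2) else st) = pvStep := rfl
    rw [hstep, pvFoldl_step]
    have hpw := pv_enum_pairwise scores 0
    have hget := pv_enum_get scores
    have hmap2 : ((( PySem.List.enumerate scores).filter (fun p => decide (p.2 ≠ 0))).map (·.1)).map
        (fun i => PySem.List.pyGetD scores i 0)
        = ((PySem.List.enumerate scores).filter (fun p => decide (p.2 ≠ 0))).map (fun x => x.2) := by
      rw [List.map_map]
      exact List.map_congr_left (fun q hq => hget q (List.mem_of_mem_filter hq))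
    have hfilt : ∀ m : Int, ((((PySem.List.enumerate scores).filter (fun p => decide (p.2 ≠ 0))).map (·.1)).filter
          (fun i => decide (PySem.List.pyGetD scores i 0 = m)))
        = (((PySem.List.enumerate scores).filter (fun p => decide (p.2 ≠ 0))).filter
            (fun q => decide (q.2 = m))).map (fun x => x.1) := by
      intro m
      rw [List.filter_map]
      congr 1
      apply List.filter_congr
      intro q hq
      simp [Function.comp, hget q (List.mem_of_mem_filter hq)]
    rcases hbest : pvBest (PySem.List.enumerate scores) with ⟨bi, bs⟩
    rcases bs with _ | m
    · -- no non-zero score anywhere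
      have hnz : (PySem.List.enumerate scores).filter (fun p => decide (p.2 ≠ 0)) = [] := by
        rw [← pvBest_none, hbest]
      rw [hnz]
      simp
    · -- best = (bi, some m)
      have ⟨hmin, hmax⟩ := pvBest_spec (PySem.List.enumerate scores) hpw m bi hbest
      have hnz : ((PySem.List.enumerate scores).filter (fun p => decide (p.2 ≠ 0))).map (·.1) ≠ [] := by
        intro hc
        rw [List.map_eq_nil_iff] at hc
        rw [← pvBest_none, hbest] at hc
        simp at hc
      rw [if_neg hnz]
      rw [hmap2]
      rw [show (PySem.List.min? (((PySem.List.enumerate scores).filter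
            (fun p => decide (p.2 ≠ 0))).map (fun x => x.2)) (fun x => x)).getD 0 = m from by
          rw [hmin]; rfl]
      rw [hfilt m, hmax]
      simp
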